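-- pv_equiv track=rewrite | github.com/BerkeEvrensevdi/DES-Algorithm | des_alg.py | message_to_blocks
-- ===== SOURCE A (Python) =====
-- def ascii_to_binary(x):
--     result = []
--     for t in range(8):
--         n = x % 2
--         result.append(n)
--         x = x//2
--
--     result.reverse()
--     return result
--
-- def message_to_blocks(msg):
--     msg_blocks = []
--     k = []
--
--     for i in range(len(msg)):
--
--         k = k + ascii_to_binary(ord(msg[i]))
--         if i % 8 == 7:
--             msg_blocks.append(k)
--             k = []
--
--     if k:  # if k is not empty then the last block is not 64-bit
--
--         empty_bytes = (64 - len(k)) // 8  # a char is 8 bit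
--         y = ascii_to_binary(empty_bytes)
--         for i in range(empty_bytes):
--             k += y
--         msg_blocks.append(k)
--
--     return msg_blocks
-- ===== SOURCE B (Python) =====
-- def byte_bits(x):
--     return [(x // 2 ** (7 - j)) % 2 for j in range(8)]
--
-- def message_to_blocks(msg):
--     bits = [b for ch in msg for b in byte_bits(ord(ch))]
--     nfull, rem = divmod(len(bits), 64)
--     blocks = [bits[64 * q:64 * q + 64] for q in range(nfull)]
--     if rem:
--         empty = (64 - rem) // 8
--         blocks.append(bits[64 * nfull:] + byte_bits(empty) * empty)
--     return blocks
-- ===== Notes on version B (the rewrite author's own statement) =====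
-- stated objective: alternative
-- what changed: B flattens the whole message into one bit list and slices it into 64-bit blocks arithmetically (divmod by 64), padding only the final short slice, instead of A's stateful accumulator flushed on every eighth character.
import Mathlib
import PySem

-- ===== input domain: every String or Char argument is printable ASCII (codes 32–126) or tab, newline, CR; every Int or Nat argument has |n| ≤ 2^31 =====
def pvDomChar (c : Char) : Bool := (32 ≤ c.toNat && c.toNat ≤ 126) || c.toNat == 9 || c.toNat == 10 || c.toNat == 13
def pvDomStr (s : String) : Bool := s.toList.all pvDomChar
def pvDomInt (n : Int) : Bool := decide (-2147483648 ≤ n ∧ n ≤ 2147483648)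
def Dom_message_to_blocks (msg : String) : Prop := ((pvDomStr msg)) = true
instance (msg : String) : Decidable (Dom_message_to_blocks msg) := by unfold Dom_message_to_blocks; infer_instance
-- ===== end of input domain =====

-- B replaces A's per-character accumulator (flushed every 8th char) by flatten-all-bits
-- then arithmetic slicing into 64-bit blocks, padding only the final short slice (alternative decomposition).

-- ===== PORT A =====
def ascii_to_binary (x : Int) : List Int :=
  let st := (List.range 8).foldl
      (fun (st : List Int × Int) _ =>
        (st.1 ++ [PySem.Int.mod st.2 2], PySem.Int.floordiv st.2 2)) ([], x)
  st.1.reverse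

-- the 'for i in range(len(msg))' loop of A, as structural recursion over the same state
def loopA : List Char → Nat → List (List Int) → List Int → List (List Int) × List Int
  | [], _, B, k => (B, k)
  | c :: cs, i, B, k =>
    let k' := k ++ ascii_to_binary (c.toNat : Int)
    if i % 8 == 7 then loopA cs (i+1) (B ++ [k']) []
    else loopA cs (i+1) B k'

def message_to_blocks (msg : String) : List (List Int) :=
  let st := loopA msg.toList 0 [] []
  if st.2 = [] then st.1
  else
    let empty_bytes : Int := PySem.Int.floordiv (64 - (st.2.length : Int)) 8
    let y := ascii_to_binary empty_bytes
    let k2 := (List.range empty_bytes.toNat).foldl (fun acc _ => acc ++ y) st.2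
    st.1 ++ [k2]

-- ===== PORT B =====
def byte_bits (x : Int) : List Int :=
  (List.range 8).map (fun j => PySem.Int.mod (PySem.Int.floordiv x ((2:Int)^(7-j))) 2)

def message_to_blocks_alt (msg : String) : List (List Int) :=
  let bits := msg.toList.flatMap (fun ch => byte_bits (ch.toNat : Int))
  let nfull := bits.length / 64
  let rem := bits.length % 64
  let blocks := (List.range nfull).map (fun q =>
      PySem.List.slice bits (some ((64*q : Nat) : Int)) (some ((64*q+64 : Nat) : Int)))
  if rem = 0 then blocks
  else
    let empty : Int := PySem.Int.floordiv (64 - (rem : Int)) 8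
    blocks ++ [PySem.List.slice bits (some ((64*nfull : Nat) : Int)) none
               ++ (List.replicate empty.toNat (byte_bits empty)).flatten]

-- ===== PRECONDITION & SPEC =====
def Spec_message_to_blocks (msg : String) (out : List (List Int)) : Prop := out = message_to_blocks_alt msg
instance (msg : String) (out : List (List Int)) : Decidable (Spec_message_to_blocks msg out) := by unfold Spec_message_to_blocks; infer_instance

-- ===== CLAIM (what is proved, stated in full; the proofs are below) =====
def Claim_equal_message_to_blocks : Prop := ∀ (msg : String), Dom_message_to_blocks msg → Spec_message_to_blocks msg (message_to_blocks msg)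

-- ===== LEMMAS AND PROOFS =====

def cbits (c : Char) : List Int := byte_bits (c.toNat : Int)

-- reference grouper: k = bits pending in the current block, p = chars already in it
def grpAux : List Int → Nat → List Char → List (List Int) × List Int
  | k, _, [] => ([], k)
  | k, p, c :: cs =>
    if p = 7 then
      ((k ++ cbits c) :: (grpAux [] 0 cs).1, (grpAux [] 0 cs).2)
    else grpAux (k ++ cbits c) (p+1) cs

theorem ascii_eq_byte (x : Int) : ascii_to_binary x = byte_bits x := by
  simp only [ascii_to_binary, byte_bits, List.range_succ, List.range_zero,
    List.foldl_cons, List.foldl_nil, List.map_cons,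
    List.map_nil, List.nil_append, List.cons_append, List.reverse_cons,
    List.reverse_nil]
  norm_num [PySem.Int.floordiv_eq_ediv_of_pos, PySem.Int.mod_eq_emod_of_pos, List.cons.injEq]
  omega

theorem cbits_len (c : Char) : (cbits c).length = 8 := by
  simp [cbits, byte_bits]

theorem loopA_eq (cs : List Char) : ∀ (n : Nat) (B : List (List Int)) (k : List Int),
    loopA cs n B k = (B ++ (grpAux k (n % 8) cs).1, (grpAux k (n % 8) cs).2) := by
  induction cs with
  | nil => intro n B k; simp [loopA, grpAux]
  | cons c cs ih =>
    intro n B k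
    by_cases h : n % 8 = 7
    · have h1 : (n + 1) % 8 = 0 := by omega
      simp [loopA, grpAux, h, h1, ih, ascii_eq_byte, cbits]
    · have h1 : (n + 1) % 8 = n % 8 + 1 := by omega
      simp [loopA, grpAux, h, h1, ih, ascii_eq_byte, cbits]

theorem grpAux_flatten (cs : List Char) : ∀ (k : List Int) (p : Nat),
    (grpAux k p cs).1.flatten ++ (grpAux k p cs).2 = k ++ cs.flatMap cbits := by
  induction cs with
  | nil => intro k p; simp [grpAux]
  | cons c cs ih =>
    intro k p
    by_cases h : p = 7 <;> simp [grpAux, h, ih]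

theorem grpAux_mem_len (cs : List Char) : ∀ (k : List Int) (p : Nat), p < 8 →
    k.length = 8 * p → ∀ b ∈ (grpAux k p cs).1, b.length = 64 := by
  induction cs with
  | nil => intro k p _ _ b hb; simp [grpAux] at hb
  | cons c cs ih =>
    intro k p hp hk b hb
    by_cases h : p = 7
    · simp [grpAux, h] at hb
      rcases hb with hb | hb
      · subst hb; simp [hk, h, cbits_len]
      · exact ih [] 0 (by omega) (by simp) b hb
    · simp only [grpAux, if_neg h] at hb
      exact ih (k ++ cbits c) (p + 1) (by omega) (by simp [hk, cbits_len]; omega) b hb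

theorem grpAux_rem_len (cs : List Char) : ∀ (k : List Int) (p : Nat), p < 8 →
    k.length = 8 * p → (grpAux k p cs).2.length = 8 * ((p + cs.length) % 8) := by
  induction cs with
  | nil => intro k p hp hk; simp [grpAux, hk, Nat.mod_eq_of_lt hp]
  | cons c cs ih =>
    intro k p hp hk
    by_cases h : p = 7
    · have := ih [] 0 (by omega) (by simp)
      simp only [grpAux, if_pos h, List.length_cons]
      rw [this]
      congr 1
      omega
    · have := ih (k ++ cbits c) (p + 1) (by omega) (by simp [hk, cbits_len]; omega)
      simp only [grpAux, if_neg h, List.length_cons]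
      rw [this]
      congr 1
      omega

theorem slice_flatten (L : List (List Int)) : ∀ (t : List Int) (q : Nat),
    (∀ b ∈ L, b.length = 64) → (hq : q < L.length) →
    ((L.flatten ++ t).drop (64 * q)).take 64 = L[q] := by
  induction L with
  | nil => intro t q _ hq; simp at hq
  | cons b L ih =>
    intro t q hlen hq
    have hb : b.length = 64 := hlen b (by simp)
    cases q with
    | zero =>
      simp only [Nat.mul_zero, List.drop_zero, List.flatten_cons, List.append_assoc,
        List.getElem_cons_zero]
      rw [← hb, List.take_left]
    | succ q =>
      have h64 : 64 * (q + 1) = b.length + 64 * q := by omega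
      simp only [List.flatten_cons, List.append_assoc, List.getElem_cons_succ, h64,
        ← List.drop_drop]
      rw [List.drop_left]
      exact ih t q (fun x hx => hlen x (by simp [hx])) (by simpa using hq)

theorem foldl_app_rep (y : List Int) : ∀ (n : Nat) (k : List Int),
    (List.range n).foldl (fun acc _ => acc ++ y) k = k ++ (List.replicate n y).flatten := by
  intro n
  induction n with
  | zero => simp
  | succ n ih =>
    intro k
    rw [List.range_succ, List.foldl_append, ih, List.replicate_succ', List.flatten_append]
    simp

-- ===== VERDICT (by name: the statement is the Claim_ definition above) =====
theorem message_to_blocks_spec : Claim_equal_message_to_blocks := by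
  intro msg _
  unfold Spec_message_to_blocks message_to_blocks message_to_blocks_alt
  set cs := msg.toList with hcs
  set g := grpAux [] 0 cs with hg
  have hloop : loopA cs 0 [] [] = (g.1, g.2) := by
    rw [loopA_eq]; simp [hg]
  have hflat : g.1.flatten ++ g.2 = cs.flatMap cbits := by
    simpa using grpAux_flatten cs [] 0
  have hmem : ∀ b ∈ g.1, b.length = 64 := grpAux_mem_len cs [] 0 (by omega) (by simp)
  have hrem : g.2.length = 8 * (cs.length % 8) := by
    simpa using grpAux_rem_len cs [] 0 (by omega) (by simp)
  set bits := cs.flatMap (fun ch => byte_bits ((ch.toNat : Int))) with hbits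
  have hbits' : bits = cs.flatMap cbits := rfl
  have hfl : g.1.flatten.length = 64 * g.1.length := by
    rw [List.length_flatten]
    rw [List.map_congr_left (fun b hb => hmem b hb)]
    simp [Nat.mul_comm]
  have hlen : bits.length = 64 * g.1.length + g.2.length := by
    rw [hbits', ← hflat]; simp [hfl]
  have hm : cs.length % 8 < 8 := Nat.mod_lt _ (by omega)
  have hnfull : bits.length / 64 = g.1.length := by omega
  have hremB : bits.length % 64 = g.2.length := by omega
  have hblocks : (List.range (bits.length / 64)).map (fun q =>
      PySem.List.slice bits (some ((64*q : Nat) : Int)) (some ((64*q+64 : Nat) : Int))) = g.1 := by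
    rw [hnfull]
    apply List.ext_getElem (by simp)
    intro q hq _
    simp only [List.getElem_map, List.getElem_range]
    rw [PySem.List.slice_natCast, hbits', ← hflat]
    have : 64 * q + 64 - 64 * q = 64 := by omega
    rw [this]
    exact slice_flatten g.1 g.2 q hmem (by simpa using hq)
  rw [hloop]
  by_cases hk : g.2 = []
  · have : bits.length % 64 = 0 := by rw [hremB, hk]; simp
    simp only [hk, this]
    exact hblocks.symm
  · have hne : bits.length % 64 ≠ 0 := by
      rw [hremB]; intro h; exact hk (List.eq_nil_of_length_eq_zero h)
    simp only [if_neg hk, if_neg hne]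
    rw [hblocks, hremB]
    congr 1
    have hdrop : PySem.List.slice bits (some ((64 * (bits.length / 64) : Nat) : Int)) none
        = g.2 := by
      rw [PySem.List.slice_from_natCast, hnfull, hbits', ← hflat, ← hfl, List.drop_left]
    rw [hdrop, foldl_app_rep, ascii_eq_byte]
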